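-- pv_equiv track=rewrite | github.com/GTseq/gtseq_microhap | gtseq_microhap_catalog_and_call.py | _project_alt_to_master
-- ===== SOURCE A (Python) =====
-- def _project_alt_to_master(gapped_ref: str, gapped_alt: str, ref: str, master_gaps):
--     """
--     Project a single allele alignment onto the master gap scheme.
--     Returns master_alt (same length as master_ref).
--     """
--     ref_len = len(ref)
--     # Build per-boundary insertion strings and per-base aligned char
--     insertions = [''] * (ref_len + 1)
--     per_base = [''] * ref_len
--
--     ref_i = 0
--     boundary = 0
--     for rch, ach in zip(gapped_ref, gapped_alt):
--         if rch == '-':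
--             # insertion relative to reference at current boundary (before ref base ref_i)
--             insertions[ref_i] += ach
--         else:
--             # aligned to a reference base
--             if ref_i < ref_len:
--                 per_base[ref_i] = ach
--             ref_i += 1
--
--     # Fill any unset per_base with '-' (shouldn't happen, but safe)
--     for i in range(ref_len):
--         if per_base[i] == '':
--             per_base[i] = '-'
--
--     # Now build master-alt with padding insertions to master_gaps
--     out = []
--     # boundary 0 insertions
--     ins0 = insertions[0]
--     out.append(ins0)
--     if len(ins0) < master_gaps[0]:
--         out.append('-' * (master_gaps[0] - len(ins0)))
--     # for each base: base col then boundary after it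
--     for i in range(ref_len):
--         out.append(per_base[i])
--         ins = insertions[i + 1]
--         out.append(ins)
--         if len(ins) < master_gaps[i + 1]:
--             out.append('-' * (master_gaps[i + 1] - len(ins)))
--     return ''.join(out)
-- ===== SOURCE B (Python) =====
-- def _project_alt_to_master(gapped_ref: str, gapped_alt: str, ref: str, master_gaps):
--     """Single streaming pass: emit each padded boundary and base column as it closes."""
--     ref_len = len(ref)
--     parts = []
--     ins = ''
--     ref_i = 0
--     for rch, ach in zip(gapped_ref, gapped_alt):
--         if rch == '-':
--             ins += ach
--         elif ref_i < ref_len: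
--             parts.append(ins + '-' * (master_gaps[ref_i] - len(ins)))
--             parts.append(ach)
--             ins = ''
--             ref_i += 1
--     # flush: any unreached base columns become '-', then the final boundary
--     for b in range(ref_i, ref_len):
--         parts.append(ins + '-' * (master_gaps[b] - len(ins)))
--         parts.append('-')
--         ins = ''
--     parts.append(ins + '-' * (master_gaps[ref_len] - len(ins)))
--     return ''.join(parts)
-- ===== Notes on version B (the rewrite author's own statement) =====
-- stated objective: simpler
-- what changed: Replaced A's three passes (collect insertions[] and per_base[] arrays, fill unset bases, then render) by a single streaming pass over zip(gapped_ref, gapped_alt) that emits each padded boundary and base column as it closes, plus one flush loop for unreached positions; the intermediate arrays disappear.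
import Mathlib
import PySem

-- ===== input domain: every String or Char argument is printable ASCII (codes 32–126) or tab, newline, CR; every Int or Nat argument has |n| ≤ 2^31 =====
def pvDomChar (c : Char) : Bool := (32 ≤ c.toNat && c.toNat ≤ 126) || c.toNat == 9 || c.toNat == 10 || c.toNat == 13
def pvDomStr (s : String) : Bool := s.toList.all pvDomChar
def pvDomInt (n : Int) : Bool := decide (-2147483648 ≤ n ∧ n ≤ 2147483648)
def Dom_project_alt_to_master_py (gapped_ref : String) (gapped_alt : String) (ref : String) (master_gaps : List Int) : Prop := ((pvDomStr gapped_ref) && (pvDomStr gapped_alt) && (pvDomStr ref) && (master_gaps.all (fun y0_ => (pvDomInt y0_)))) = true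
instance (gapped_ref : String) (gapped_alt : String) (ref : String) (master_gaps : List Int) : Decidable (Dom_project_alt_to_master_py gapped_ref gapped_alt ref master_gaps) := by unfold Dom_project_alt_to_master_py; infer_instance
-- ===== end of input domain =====

-- B replaces A's three passes (collect insertion/base arrays, fill pass, render pass) by one
-- streaming pass that emits each padded boundary and base column as it closes (objective: simpler).

-- ===== PORT A =====
-- A's zip loop: per-boundary insertion strings, per-base chars, counter ref_i
def pvA_loop (refLen : Nat) : List (Char × Char) → List (List Char) → List (List Char) → Nat →
    List (List Char) × List (List Char) × Nat
  | [], ins, pb, ri => (ins, pb, ri)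
  | (rch, ach) :: zs, ins, pb, ri =>
    if rch = '-' then pvA_loop refLen zs (ins.modify ri (· ++ [ach])) pb ri
    else pvA_loop refLen zs ins (if ri < refLen then pb.set ri [ach] else pb) (ri + 1)

-- A's render loop `for i in range(ref_len)`: n = iterations left, i = current index
def pvA_rows (gs : List Int) (ins pb : List (List Char)) : Nat → Nat → List Char
  | 0, _ => []
  | n+1, i =>
    let s := ins.getD (i+1) []
    pb.getD i [] ++ s ++
      (if (s.length : Int) < gs.getD (i+1) 0 then List.replicate (gs.getD (i+1) 0 - (s.length : Int)).toNat '-' else []) ++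
      pvA_rows gs ins pb n (i+1)

def project_alt_to_master_py (gapped_ref : String) (gapped_alt : String) (ref : String) (master_gaps : List Int) : String :=
  let refLen := ref.toList.length
  let st := pvA_loop refLen (gapped_ref.toList.zip gapped_alt.toList)
              (List.replicate (refLen + 1) []) (List.replicate refLen []) 0
  let ins := st.1
  -- the fill pass: unset per-base entries become "-"
  let pb := st.2.1.map (fun s => if s = [] then ['-'] else s)
  let ins0 := ins.getD 0 []
  String.ofList (ins0 ++
    (if (ins0.length : Int) < master_gaps.getD 0 0 then List.replicate (master_gaps.getD 0 0 - (ins0.length : Int)).toNat '-' else []) ++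
    pvA_rows master_gaps ins pb refLen 0)

-- ===== PORT B =====
-- ins + '-' * (g - len(ins))   (Python's '-'*k is '' for k ≤ 0)
def pvB_pad (ins : List Char) (g : Int) : List Char := ins ++ List.replicate (g - (ins.length : Int)).toNat '-'

-- B's flush loop `for b in range(ref_i, ref_len)` plus the final boundary append
def pvB_flush (gs : List Int) : Nat → Nat → List Char → List Char
  | 0, b, ins => pvB_pad ins (gs.getD b 0)
  | n+1, b, ins => pvB_pad ins (gs.getD b 0) ++ '-' :: pvB_flush gs n (b+1) []

-- B's single streaming pass: acc = joined parts so far, ins = pending insertion, ri = bases emitted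
def pvB_go (gs : List Int) (refLen : Nat) : List (Char × Char) → List Char → List Char → Nat → List Char
  | [], acc, ins, ri => acc ++ pvB_flush gs (refLen - ri) ri ins
  | (rch, ach) :: zs, acc, ins, ri =>
    if rch = '-' then pvB_go gs refLen zs acc (ins ++ [ach]) ri
    else if ri < refLen then pvB_go gs refLen zs (acc ++ pvB_pad ins (gs.getD ri 0) ++ [ach]) [] (ri + 1)
    else pvB_go gs refLen zs acc ins ri

def project_alt_to_master_py_alt (gapped_ref : String) (gapped_alt : String) (ref : String) (master_gaps : List Int) : String :=
  String.ofList (pvB_go master_gaps ref.toList.length (gapped_ref.toList.zip gapped_alt.toList) [] [] 0)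

-- ===== PRECONDITION & SPEC =====
-- Pre_ excludes exactly the inputs where Python A raises IndexError: master_gaps shorter than
-- len(ref)+1 (the master_gaps[i] lookups), or a '-' column of gapped_ref occurring after more
-- than len(ref) non-gap columns (insertions[ref_i] with ref_i out of range).
def Pre_project_alt_to_master_py (gapped_ref : String) (gapped_alt : String) (ref : String) (master_gaps : List Int) : Prop :=
  ref.toList.length + 1 ≤ master_gaps.length ∧
  ∀ j < (gapped_ref.toList.zip gapped_alt.toList).length,
    ((gapped_ref.toList.zip gapped_alt.toList).getD j (' ', ' ')).1 = '-' →
    ((gapped_ref.toList.zip gapped_alt.toList).take j).countP (fun p => p.1 ≠ '-') ≤ ref.toList.length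
instance (gapped_ref : String) (gapped_alt : String) (ref : String) (master_gaps : List Int) : Decidable (Pre_project_alt_to_master_py gapped_ref gapped_alt ref master_gaps) := by unfold Pre_project_alt_to_master_py; infer_instance

def pvWitness_project_alt_to_master_py : String × String × String × List Int := ("A-C", "TGA", "AC", [0, 1, 0])

def Spec_project_alt_to_master_py (gapped_ref : String) (gapped_alt : String) (ref : String) (master_gaps : List Int) (out : String) : Prop := out = project_alt_to_master_py_alt gapped_ref gapped_alt ref master_gaps
instance (gapped_ref : String) (gapped_alt : String) (ref : String) (master_gaps : List Int) (out : String) : Decidable (Spec_project_alt_to_master_py gapped_ref gapped_alt ref master_gaps out) := by unfold Spec_project_alt_to_master_py; infer_instance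

-- ===== CLAIM (what is proved, stated in full; the proofs are below) =====
def Claim_equal_project_alt_to_master_py : Prop := ∀ (gapped_ref : String) (gapped_alt : String) (ref : String) (master_gaps : List Int), Dom_project_alt_to_master_py gapped_ref gapped_alt ref master_gaps → Pre_project_alt_to_master_py gapped_ref gapped_alt ref master_gaps → Spec_project_alt_to_master_py gapped_ref gapped_alt ref master_gaps (project_alt_to_master_py gapped_ref gapped_alt ref master_gaps)

-- ===== LEMMAS AND PROOFS =====

-- A's guarded pad string equals B's unconditional one
lemma pv_padIf (s : List Char) (g : Int) :
    (if (s.length : Int) < g then List.replicate (g - (s.length : Int)).toNat '-' else ([] : List Char)) =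
      List.replicate (g - (s.length : Int)).toNat '-' := by
  split
  · rfl
  · have : (g - (s.length : Int)).toNat = 0 := by omega
    simp [this]

-- the suffix of A's render starting at boundary w
def pvRenderFrom (gs : List Int) (L : Nat) (I Pf : List (List Char)) (w : Nat) : List Char :=
  pvB_pad (I.getD w []) (gs.getD w 0) ++ pvA_rows gs I Pf (L - w) w

-- B's tail flush equals A's render rows over empty boundaries and '-' base columns
lemma pv_flushEq (gs : List Int) (I Pf : List (List Char)) :
    ∀ (n w : Nat) (ins : List Char),
    (∀ k, w < k → k ≤ w + n → I.getD k [] = []) →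
    (∀ i, w ≤ i → i < w + n → Pf.getD i [] = ['-']) →
    pvB_flush gs n w ins = pvB_pad ins (gs.getD w 0) ++ pvA_rows gs I Pf n w := by
  intro n
  induction n with
  | zero => intro w ins _ _; simp [pvB_flush, pvA_rows]
  | succ n ih =>
    intro w ins hI hP
    have hI1 : I.getD (w + 1) [] = [] := hI _ (by omega) (by omega)
    have hrec := ih (w + 1) [] (fun k hk hk' => hI _ (by omega) (by omega))
      (fun i hi hi' => hP _ (by omega) (by omega))
    simp only [pvB_flush, pvA_rows, hrec, hP w le_rfl (by omega), hI1]
    simp [pvB_pad]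

-- boundaries strictly below the current counter are never touched again by A's loop
lemma pv_loopA_frozenI (L : Nat) :
    ∀ (zs : List (Char × Char)) (I P : List (List Char)) (v k : Nat), k < v →
    ((pvA_loop L zs I P v).1).getD k [] = I.getD k [] := by
  intro zs
  induction zs with
  | nil => intro I P v k _; rfl
  | cons z zs ih =>
    intro I P v k hk
    obtain ⟨rch, ach⟩ := z
    by_cases h : rch = '-'
    · simp only [pvA_loop, if_pos h]
      rw [ih _ _ _ _ hk]
      rw [List.getD_eq_getElem?_getD, List.getD_eq_getElem?_getD, List.getElem?_modify]
      have hne : v ≠ k := by omega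
      cases I[k]? <;> simp [hne]
    · simp only [pvA_loop, if_neg h]
      exact ih _ _ _ _ (by omega)

-- base columns strictly below the current counter are never touched again by A's loop
lemma pv_loopA_frozenP (L : Nat) :
    ∀ (zs : List (Char × Char)) (I P : List (List Char)) (v k : Nat), k < v →
    ((pvA_loop L zs I P v).2.1).getD k [] = P.getD k [] := by
  intro zs
  induction zs with
  | nil => intro I P v k _; rfl
  | cons z zs ih =>
    intro I P v k hk
    obtain ⟨rch, ach⟩ := z
    by_cases h : rch = '-'
    · simp only [pvA_loop, if_pos h]
      exact ih _ _ _ _ hk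
    · simp only [pvA_loop, if_neg h]
      rw [ih _ _ _ _ (by omega)]
      split
      · rw [List.getD_eq_getElem?_getD, List.getD_eq_getElem?_getD,
          List.getElem?_set_ne (by omega)]
      · rfl

-- A's loop preserves the lengths of both arrays
lemma pv_loopA_lengths (L : Nat) :
    ∀ (zs : List (Char × Char)) (I P : List (List Char)) (v : Nat),
    ((pvA_loop L zs I P v).1).length = I.length ∧ ((pvA_loop L zs I P v).2.1).length = P.length := by
  intro zs
  induction zs with
  | nil => intro I P v; exact ⟨rfl, rfl⟩
  | cons z zs ih =>
    intro I P v
    obtain ⟨rch, ach⟩ := z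
    by_cases h : rch = '-'
    · simp only [pvA_loop, if_pos h]
      have := ih (I.modify v (· ++ [ach])) P v
      simpa using this
    · simp only [pvA_loop, if_neg h]
      have := ih I (if v < L then P.set v [ach] else P) (v + 1)
      rcases this with ⟨h1, h2⟩
      refine ⟨h1, ?_⟩
      rw [h2]; split <;> simp

-- the simulation invariant: B's streaming pass, started from A's mid-loop state, produces
-- exactly the render of A's final arrays from boundary (min v L) onwards
lemma pv_sim (gs : List Int) (L : Nat) :
    ∀ (zs : List (Char × Char)) (I P : List (List Char)) (v : Nat) (acc : List Char),
    I.length = L + 1 → P.length = L →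
    (∀ k, v < k → I.getD k [] = []) →
    (∀ i, min v L ≤ i → P.getD i [] = []) →
    (∀ j, j < zs.length → ((zs.getD j (' ', ' ')).1 = '-') →
        v + (zs.take j).countP (fun p => p.1 ≠ '-') ≤ L) →
    pvB_go gs L zs acc (I.getD (min v L) []) (min v L) =
      acc ++ pvRenderFrom gs L (pvA_loop L zs I P v).1
        (((pvA_loop L zs I P v).2.1).map (fun s => if s = [] then ['-'] else s)) (min v L) := by
  intro zs
  induction zs with
  | nil =>
    intro I P v acc hI hP hIk hPi _
    simp only [pvB_go, pvA_loop, pvRenderFrom]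
    congr 1
    apply pv_flushEq
    · intro k hk hk'
      exact hIk k (by omega)
    · intro i hi hi'
      have hiL : i < L := by omega
      have hilen : i < P.length := by omega
      have hPi' : P[i] = [] := by
        have := hPi i hi
        rwa [List.getD_eq_getElem?_getD, List.getElem?_eq_getElem hilen] at this
      rw [List.getD_eq_getElem?_getD, List.getElem?_map, List.getElem?_eq_getElem hilen]
      simp [hPi']
  | cons z zs ih =>
    intro I P v acc hI hP hIk hPi hpre
    obtain ⟨rch, ach⟩ := z
    by_cases h : rch = '-'
    · -- insertion column: Pre gives v ≤ L, so the pending boundary is a real one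
      have hvL : v ≤ L := by
        have := hpre 0 (by simp) (by simpa using h)
        simpa using this
      have hmin : min v L = v := by omega
      have hvlen : v < I.length := by omega
      have hIns : (I.modify v (· ++ [ach])).getD v [] = I.getD v [] ++ [ach] := by
        rw [List.getD_eq_getElem?_getD, List.getD_eq_getElem?_getD, List.getElem?_modify,
          List.getElem?_eq_getElem hvlen]
        simp
      have hIk' : ∀ k, v < k → (I.modify v (· ++ [ach])).getD k [] = [] := by
        intro k hk
        have hprev := hIk k hk
        rw [List.getD_eq_getElem?_getD] at hprev
        rw [List.getD_eq_getElem?_getD, List.getElem?_modify]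
        have hne : v ≠ k := by omega
        cases hx : I[k]? with
        | none => simp
        | some val =>
          rw [hx] at hprev
          simp only [Option.getD_some] at hprev
          simp [hne, hprev]
      have hpre' : ∀ j, j < zs.length → ((zs.getD j (' ', ' ')).1 = '-') →
          v + (zs.take j).countP (fun p => p.1 ≠ '-') ≤ L := by
        intro j hj hd
        have := hpre (j + 1) (by simpa using Nat.succ_lt_succ hj) (by simpa using hd)
        simpa [List.countP_cons, h] using this
      have := ih (I.modify v (· ++ [ach])) P v acc (by simpa using hI) hP hIk'
        hPi hpre'
      simp only [hmin] at this ⊢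
      simp only [pvB_go, pvA_loop, if_pos h]
      rw [← hIns]
      exact this
    · by_cases hv : v < L
      · -- a new base column closes boundary v
        have hmin : min v L = v := by omega
        have hmin' : min (v + 1) L = v + 1 := by omega
        have hvlenP : v < P.length := by omega
        have hpre' : ∀ j, j < zs.length → ((zs.getD j (' ', ' ')).1 = '-') →
            (v + 1) + (zs.take j).countP (fun p => p.1 ≠ '-') ≤ L := by
          intro j hj hd
          have h1 := hpre (j + 1) (by simpa using Nat.succ_lt_succ hj) (by simpa using hd)
          have h2 : (((rch, ach) :: zs).take (j + 1)).countP (fun p => p.1 ≠ '-') =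
              (zs.take j).countP (fun p => p.1 ≠ '-') + 1 := by
            simp [h]
          rw [h2] at h1
          omega
        have hPi' : ∀ i, min (v + 1) L ≤ i → (P.set v [ach]).getD i [] = [] := by
          intro i hi
          rw [List.getD_eq_getElem?_getD, List.getElem?_set_ne (by omega),
            ← List.getD_eq_getElem?_getD]
          exact hPi i (by omega)
        have hIv1 : I.getD (v + 1) [] = [] := hIk _ (by omega)
        have key := ih I (P.set v [ach]) (v + 1)
          (acc ++ pvB_pad (I.getD v []) (gs.getD v 0) ++ [ach]) hI (by simpa using hP)
          (fun k hk => hIk k (by omega)) hPi' hpre'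
        rw [hmin', hIv1] at key
        simp only [pvB_go, pvA_loop, if_neg h, if_pos hv, hmin]
        rw [key]
        -- now peel one row off the render
        set R := pvA_loop L zs I (P.set v [ach]) (v + 1) with hR
        have hfrozI : (R.1).getD v [] = I.getD v [] := pv_loopA_frozenI L zs _ _ _ _ (by omega)
        have hfrozP : (R.2.1).getD v [] = [ach] := by
          rw [pv_loopA_frozenP L zs _ _ _ _ (by omega), List.getD_eq_getElem?_getD,
            List.getElem?_set_self hvlenP]
          rfl
        have hlenR : (R.2.1).length = L := by
          have := (pv_loopA_lengths L zs I (P.set v [ach]) (v + 1)).2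
          simpa [hP] using this
        have hmapv : ((R.2.1).map (fun s => if s = [] then ['-'] else s)).getD v [] = [ach] := by
          have hvlenR : v < (R.2.1).length := by omega
          rw [List.getD_eq_getElem?_getD, List.getElem?_map, List.getElem?_eq_getElem hvlenR]
          have : (R.2.1)[v] = [ach] := by
            have := hfrozP
            rwa [List.getD_eq_getElem?_getD, List.getElem?_eq_getElem hvlenR] at this
          simp [this]
        have hLv : L - v = (L - (v + 1)) + 1 := by omega
        simp only [pvRenderFrom, hLv, pvA_rows, hfrozI, hmapv, pv_padIf]
        simp [pvB_pad]
      · -- extra aligned column beyond the reference: A drops the char, B does nothing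
        have hmin : min v L = L := by omega
        have hmin' : min (v + 1) L = L := by omega
        have hpre' : ∀ j, j < zs.length → ((zs.getD j (' ', ' ')).1 = '-') →
            (v + 1) + (zs.take j).countP (fun p => p.1 ≠ '-') ≤ L := by
          intro j hj hd
          have h1 := hpre (j + 1) (by simpa using Nat.succ_lt_succ hj) (by simpa using hd)
          have h2 : (((rch, ach) :: zs).take (j + 1)).countP (fun p => p.1 ≠ '-') =
              (zs.take j).countP (fun p => p.1 ≠ '-') + 1 := by
            simp [h]
          rw [h2] at h1
          omega
        have key := ih I P (v + 1) acc hI hP (fun k hk => hIk k (by omega))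
          (by simpa [hmin', hmin] using hPi) hpre'
        rw [hmin'] at key
        simp only [pvB_go, pvA_loop, if_neg h, if_neg hv, hmin]
        rw [if_neg (lt_irrefl L)]
        exact key

-- ===== VERDICT (by name: the statement is the Claim_ definition above) =====
theorem project_alt_to_master_py_spec : Claim_equal_project_alt_to_master_py := by
  intro gapped_ref gapped_alt ref master_gaps _ hpre
  unfold Spec_project_alt_to_master_py
  obtain ⟨hlen, hcol⟩ := hpre
  set L := ref.toList.length with hLdef
  set zs := gapped_ref.toList.zip gapped_alt.toList with hzs
  have hrepl : ∀ (n : Nat) (k : Nat), (List.replicate n ([] : List Char)).getD k [] = [] := by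
    intro n k
    rw [List.getD_eq_getElem?_getD, List.getElem?_replicate]
    split <;> rfl
  have key := pv_sim master_gaps L zs (List.replicate (L + 1) []) (List.replicate L []) 0 []
    (by simp) (by simp) (fun k _ => hrepl _ _) (fun i _ => hrepl _ _)
    (by intro j hj hd; simpa using hcol j hj hd)
  simp only [Nat.zero_min, hrepl, List.nil_append] at key
  unfold project_alt_to_master_py project_alt_to_master_py_alt
  simp only [← hzs, ← hLdef]
  rw [key]
  unfold pvRenderFrom
  simp only [pv_padIf]
  simp [pvB_pad]
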